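-- pv_equiv track=rewrite | github.com/MLiondis/2026SE.Michael.L_Learn_Python | 2-Loops/plates/plates.py | check_last_letter
-- ===== SOURCE A (Python) =====
-- def check_last_letter(string):
-- 	#stores the location of the first digit found
-- 	location = None
-- 	# stores the digit that is encountered
-- 	num = ""
-- 	for letter in string:
-- 		#checks for digits in the string
-- 		if letter.isdigit():
-- 			# finds the position of the digit
-- 			location = string.index(letter)
-- 			# adds the position to num
-- 			num += letter
-- 			break
--
-- 	if string[location:].isdigit():
-- 		if string[location].startswith("0") == False:
-- 			return True
-- ===== SOURCE B (Python) =====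
-- def check_last_letter(string):
--     # single-pass state machine: remember the first digit seen; invalidate if a
--     # non-digit follows any digit
--     first_digit = None
--     valid = True
--     for ch in string:
--         if ch.isdigit():
--             if first_digit is None:
--                 first_digit = ch
--         elif first_digit is not None:
--             valid = False
--     if first_digit is not None and valid and first_digit != "0":
--         return True
-- ===== Notes on version B (the rewrite author's own statement) =====
-- stated objective: alternative
-- what changed: Replaces A's scan-for-first-digit followed by an index lookup and a re-scan of the slice string[location:] with a single fused pass that keeps (first_digit, valid) state and never re-indexes or slices the string.
import Mathlib
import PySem

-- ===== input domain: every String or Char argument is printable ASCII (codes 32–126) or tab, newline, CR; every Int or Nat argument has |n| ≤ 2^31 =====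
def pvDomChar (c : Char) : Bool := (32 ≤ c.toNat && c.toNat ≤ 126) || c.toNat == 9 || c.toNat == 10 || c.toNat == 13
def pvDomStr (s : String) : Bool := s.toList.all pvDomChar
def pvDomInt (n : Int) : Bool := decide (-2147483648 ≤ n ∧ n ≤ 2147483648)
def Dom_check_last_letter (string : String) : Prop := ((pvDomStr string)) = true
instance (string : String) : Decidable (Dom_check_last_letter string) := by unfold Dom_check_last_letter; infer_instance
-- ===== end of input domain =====

-- B replaces A's find-first-digit + string.index + re-scan of string[location:] with one
-- fused pass keeping (first_digit, valid) state — alternative decomposition, same cost.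

-- ===== PORT A =====
-- A's for-loop with break: returns (location, num) when it stops (break or end of string)
def pvLoopA (full : List Char) : List Char → Option Int × List Char
  | [] => (none, [])
  | c :: rest =>
    if PySem.Chars.isdigit c then
      ((PySem.List.index? full c).map (fun n => ((n : Nat) : Int)), [c])
    else pvLoopA full rest

def check_last_letter (string : String) : Option Bool :=
  let cs := string.toList
  let location := (pvLoopA cs cs).1
  -- string[location:] — Python slices accept None as a bound
  if PySem.Chars.strIsdigit (PySem.List.slice cs location none) then
    match location with
    | some i =>
      match PySem.List.pyGet? cs i with
      | some c =>
        if PySem.Chars.startswith [c] ['0'] = false then some true else none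
      | none => none   -- IndexError in Python; unreachable here
    | none => none     -- TypeError string[None] in Python; unreachable here
  else none

-- ===== PORT B =====
-- one fused pass: (first_digit, valid)
def pvStepB (st : Option Char × Bool) (ch : Char) : Option Char × Bool :=
  if PySem.Chars.isdigit ch then
    match st.1 with
    | none => (some ch, st.2)
    | some _ => st
  else
    match st.1 with
    | some _ => (st.1, false)
    | none => st

def check_last_letter_alt (string : String) : Option Bool :=
  let st := string.toList.foldl pvStepB (none, true)
  match st.1 with
  | some d => if st.2 && (d != '0') then some true else none
  | none => none

-- ===== PRECONDITION & SPEC =====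
def Spec_check_last_letter (string : String) (out : Option Bool) : Prop := out = check_last_letter_alt string
instance (string : String) (out : Option Bool) : Decidable (Spec_check_last_letter string out) := by unfold Spec_check_last_letter; infer_instance

-- ===== CLAIM (what is proved, stated in full; the proofs are below) =====
def Claim_equal_check_last_letter : Prop := ∀ (string : String), Dom_check_last_letter string → Spec_check_last_letter string (check_last_letter string)

-- ===== LEMMAS AND PROOFS =====

theorem pvLoopA_no_digit (full : List Char) (l : List Char)
    (h : ∀ c ∈ l, PySem.Chars.isdigit c = false) : pvLoopA full l = (none, []) := by
  induction l with
  | nil => rfl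
  | cons c rest ih =>
    simp only [pvLoopA, h c (by simp)]
    exact ih (fun c hc => h c (by simp [hc]))

theorem pvLoopA_split (full : List Char) (p : List Char) (d : Char) (t : List Char)
    (hp : ∀ c ∈ p, PySem.Chars.isdigit c = false) (hd : PySem.Chars.isdigit d = true) :
    pvLoopA full (p ++ d :: t) =
      ((PySem.List.index? full d).map (fun n => ((n : Nat) : Int)), [d]) := by
  induction p with
  | nil => simp [pvLoopA, hd]
  | cons c rest ih =>
    simp only [List.cons_append, pvLoopA, hp c (by simp)]
    exact ih (fun c hc => hp c (by simp [hc]))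

theorem index?_of_split (p : List Char) (d : Char) (t : List Char)
    (hp : d ∉ p) : PySem.List.index? (p ++ d :: t) d = some p.length := by
  rw [PySem.List.index?_eq_some_iff]
  exact ⟨p, t, rfl, rfl, hp⟩

theorem foldB_no_digit (p : List Char) (v : Bool)
    (hp : ∀ c ∈ p, PySem.Chars.isdigit c = false) :
    p.foldl pvStepB (none, v) = (none, v) := by
  induction p with
  | nil => rfl
  | cons c rest ih =>
    simp only [List.foldl_cons, pvStepB, hp c (by simp)]
    exact ih (fun c hc => hp c (by simp [hc]))

theorem foldB_after_digit (t : List Char) (x : Char) (v : Bool) :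
    t.foldl pvStepB (some x, v) = (some x, v && t.all PySem.Chars.isdigit) := by
  induction t generalizing v with
  | nil => simp
  | cons c rest ih =>
    by_cases hc : PySem.Chars.isdigit c = true
    · simp [pvStepB, hc, ih]
    · simp only [Bool.not_eq_true] at hc
      simp [pvStepB, hc, ih]

-- every string either has no digit, or splits at its first digit
theorem split_first_digit (cs : List Char) :
    (∀ c ∈ cs, PySem.Chars.isdigit c = false) ∨
    ∃ p d t, cs = p ++ d :: t ∧ (∀ c ∈ p, PySem.Chars.isdigit c = false) ∧
      PySem.Chars.isdigit d = true := by
  induction cs with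
  | nil => left; simp
  | cons c rest ih =>
    by_cases hc : PySem.Chars.isdigit c = true
    · right; exact ⟨[], c, rest, by simp, by simp, hc⟩
    · simp only [Bool.not_eq_true] at hc
      rcases ih with h | ⟨p, d, t, h1, h2, h3⟩
      · left
        intro x hx
        rcases List.mem_cons.mp hx with rfl | hx
        · exact hc
        · exact h x hx
      · right
        refine ⟨c :: p, d, t, by simp [h1], ?_, h3⟩
        intro x hx
        rcases List.mem_cons.mp hx with rfl | hx
        · exact hc
        · exact h2 x hx

-- the core equivalence on the character list
theorem core_eq (cs : List Char) :
    (let location := (pvLoopA cs cs).1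
     if PySem.Chars.strIsdigit (PySem.List.slice cs location none) then
       match location with
       | some i =>
         match PySem.List.pyGet? cs i with
         | some c => if PySem.Chars.startswith [c] ['0'] = false then some true else none
         | none => none
       | none => none
     else none) =
    (let st := cs.foldl pvStepB (none, true)
     match st.1 with
     | some d => if st.2 && (d != '0') then some true else (none : Option Bool)
     | none => none) := by
  rcases split_first_digit cs with hall | ⟨p, d, t, hcs, hp, hd⟩
  · -- no digit anywhere
    rw [pvLoopA_no_digit cs cs hall]
    simp only [foldB_no_digit cs true hall]
    simp
  · subst hcs
    have hdp : d ∉ p := fun hmem => by simp [hp d hmem] at hd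
    -- A side
    rw [pvLoopA_split _ p d t hp hd, index?_of_split p d t hdp]
    simp only [Option.map_some]
    rw [PySem.List.slice_from_natCast]
    have hdrop : (p ++ d :: t).drop p.length = d :: t := by
      simp [List.drop_left']
    rw [hdrop]
    have hget : PySem.List.pyGet? (p ++ d :: t) ((p.length : Nat) : Int) = some d := by
      rw [PySem.List.pyGet?_natCast]; simp
    rw [hget]
    -- B side
    rw [List.foldl_append, foldB_no_digit p true hp]
    simp only [List.foldl_cons, pvStepB, hd, if_true]
    rw [foldB_after_digit t d true]
    simp only [PySem.Chars.strIsdigit, PySem.Chars.startswith]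
    by_cases hall : t.all PySem.Chars.isdigit = true
    · by_cases h0 : d = '0'
      · subst h0; simp [hall, hd]
      · have hpre : (['0'].isPrefixOf [d]) = false := by
          simp [List.isPrefixOf]
          exact fun h => h0 h.symm
        simp [hall, hd, hpre, h0]
    · simp only [Bool.not_eq_true] at hall
      simp [hall, hd]

-- ===== VERDICT (by name: the statement is the Claim_ definition above) =====
theorem check_last_letter_spec : Claim_equal_check_last_letter := by
  intro s _
  unfold Spec_check_last_letter check_last_letter check_last_letter_alt
  exact core_eq s.toList
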